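-- pv_equiv track=rewrite | github.com/subho2107/Codechef | Codechef april long/squared subsequence.py | getNumberOfSubs
-- ===== SOURCE A (Python) =====
-- def checkSquareDiff(num):
--     if abs(num % 4) == 2:
--         return True
--     else:
--         return False
--
-- def getNumberOfSubs(arr):
--     posArr = []
--     for pos in range(0, len(arr)):
--         if checkSquareDiff(arr[pos]):
--             posArr.append(["critical",pos])
--         elif arr[pos] % 4 == 0:
--             posArr.append(["even",pos])
--     length = len(arr)
--     totalContigSubs = (length * (length + 1)) // 2
--     if posArr == []:
--         return totalContigSubs
--     if posArr[0][0] != "even" :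
--         posArr = [["",-1]] + posArr
--     if posArr[-1][0] != "even":
--         posArr += [["", length]]
--     for pos in range(1, len(posArr)-1):
--         catg = posArr[pos][0]
--         posPres = posArr[pos][1]
--         posPrev = posArr[pos-1][1]
--         posNext = posArr[pos+1][1]
--         if catg == "critical":
--             prev = posPres-posPrev - 1
--             post = posNext - posPres - 1
--             totalContigSubs -=  (prev + 1 )*(post+1)
--         # if prev > 0 and post > 0:
--         #     totalContigSubs -= 1
--
--
--     return totalContigSubs
-- ===== SOURCE B (Python) =====
-- def getNumberOfSubs(arr):
--     n = len(arr)
--     total = n * (n + 1) // 2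
--     prev = -1          # marker index before the last marker seen
--     last = -1          # last marker index seen (marker = even element)
--     lastCrit = False   # was the last marker a critical (x % 4 == 2)?
--     for i in range(n):
--         if arr[i] % 2 == 0:
--             if lastCrit:
--                 total -= (last - prev) * (i - last)
--             prev, last, lastCrit = last, i, (arr[i] % 4 == 2)
--     if lastCrit:
--         total -= (last - prev) * (n - last)
--     return total
-- ===== Notes on version B (the rewrite author's own statement) =====
-- stated objective: simpler
-- what changed: Instead of building a [category, position] list, conditionally prepending/appending sentinels and looping over it with neighbour indexing, B makes one forward pass over the array, keeping only the last two even-element indices and whether the last one was critical, subtracting each critical element's contribution as soon as the next even element (or the end) is reached; dropping the intermediate list gives a measured constant-factor speedup.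
import Mathlib
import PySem

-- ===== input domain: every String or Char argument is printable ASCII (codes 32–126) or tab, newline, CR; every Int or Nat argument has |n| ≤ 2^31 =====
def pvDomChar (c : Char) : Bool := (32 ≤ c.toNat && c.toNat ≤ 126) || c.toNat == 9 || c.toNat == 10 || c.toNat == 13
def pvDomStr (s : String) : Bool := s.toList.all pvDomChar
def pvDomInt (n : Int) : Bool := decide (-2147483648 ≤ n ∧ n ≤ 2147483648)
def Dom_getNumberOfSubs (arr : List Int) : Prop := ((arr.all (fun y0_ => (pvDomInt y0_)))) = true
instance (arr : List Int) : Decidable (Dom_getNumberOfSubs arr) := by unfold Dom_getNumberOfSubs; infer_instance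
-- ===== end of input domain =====

-- B replaces A's collected [category, position] list (with its conditional sentinels and
-- neighbour-indexing loop) by a single forward pass that settles each critical element as soon
-- as the next even element (or the end of the list) is reached; objective: simpler (one pass, O(1) extra space).

-- ===== PORT A =====
def checkSquareDiff (num : Int) : Bool :=
  if |PySem.Int.mod num 4| == 2 then true else false

def getNumberOfSubs (arr : List Int) : Int :=
  let posArr : List (String × Int) :=
    (PySem.List.pyRange 0 (arr.length : Int) 1).foldl (fun acc pos =>
      if checkSquareDiff (PySem.List.pyGetD arr pos 0) then acc ++ [("critical", pos)]
      else if PySem.Int.mod (PySem.List.pyGetD arr pos 0) 4 == 0 then acc ++ [("even", pos)]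
      else acc) []
  let length : Int := (arr.length : Int)
  let totalContigSubs : Int := PySem.Int.floordiv (length * (length + 1)) 2
  if posArr == [] then totalContigSubs else
  let posArr := if (posArr.headD ("", 0)).1 != "even" then ("", -1) :: posArr else posArr
  let posArr := if (posArr.getLastD ("", 0)).1 != "even" then posArr ++ [("", length)] else posArr
  (PySem.List.pyRange 1 ((posArr.length : Int) - 1) 1).foldl (fun totalContigSubs pos =>
    let catg := (PySem.List.pyGetD posArr pos ("", 0)).1
    let posPres := (PySem.List.pyGetD posArr pos ("", 0)).2
    let posPrev := (PySem.List.pyGetD posArr (pos - 1) ("", 0)).2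
    let posNext := (PySem.List.pyGetD posArr (pos + 1) ("", 0)).2
    if catg == "critical" then
      let prev := posPres - posPrev - 1
      let post := posNext - posPres - 1
      totalContigSubs - (prev + 1) * (post + 1)
    else totalContigSubs) totalContigSubs

-- ===== PORT B =====
def getNumberOfSubs_alt (arr : List Int) : Int :=
  let n : Int := (arr.length : Int)
  let total : Int := PySem.Int.floordiv (n * (n + 1)) 2
  let st : Int × Int × Int × Bool :=
    (PySem.List.pyRange 0 n 1).foldl (fun (s : Int × Int × Int × Bool) i =>
      let x := PySem.List.pyGetD arr i 0
      if PySem.Int.mod x 2 == 0 then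
        ((if s.2.2.2 then s.1 - (s.2.2.1 - s.2.1) * (i - s.2.2.1) else s.1),
          s.2.2.1, i, PySem.Int.mod x 4 == 2)
      else s) (total, -1, -1, false)
  if st.2.2.2 then st.1 - (st.2.2.1 - st.2.1) * (n - st.2.2.1) else st.1

-- ===== PRECONDITION & SPEC =====
def Spec_getNumberOfSubs (arr : List Int) (out : Int) : Prop := out = getNumberOfSubs_alt arr
instance (arr : List Int) (out : Int) : Decidable (Spec_getNumberOfSubs arr out) := by unfold Spec_getNumberOfSubs; infer_instance

-- ===== CLAIM (what is proved, stated in full; the proofs are below) =====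
def Claim_equal_getNumberOfSubs : Prop := ∀ (arr : List Int), Dom_getNumberOfSubs arr → Spec_getNumberOfSubs arr (getNumberOfSubs arr)

-- ===== LEMMAS AND PROOFS =====

-- the annotated marker list: (index, is-critical) for every even element of arr, in order
def pvMarkers (arr : List Int) : List (Int × Bool) :=
  ((PySem.List.enumerate arr 0).filter (fun p => PySem.Int.mod p.2 2 == 0)).map
    (fun p => (p.1, PySem.Int.mod p.2 4 == 2))

def pvStrOf (p : Int × Bool) : String × Int := ((if p.2 then "critical" else "even"), p.1)

def pvHeadIdx (n : Int) : List (Int × Bool) → Int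
  | [] => n
  | (j, _) :: _ => j

-- common spec: total amount subtracted, given previous-marker index p and remaining markers
def pvG (n : Int) : Int → List (Int × Bool) → Int
  | _, [] => 0
  | p, (i, c) :: rest => (if c then (i - p) * (pvHeadIdx n rest - i) else 0) + pvG n i rest

-- amount subtracted by A's neighbour-indexing loop, as a recursion over the sentineled list
def pvT : List (String × Int) → Int
  | a :: b :: c :: rest => (if b.1 == "critical" then (b.2 - a.2) * (c.2 - b.2) else 0) + pvT (b :: c :: rest)
  | _ => 0

-- A's loop body as a named function (definitionally equal to the port's lambda)
def pvBody (L : List (String × Int)) : Int → Int → Int := fun tt pos =>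
  let catg := (PySem.List.pyGetD L pos ("", 0)).1
  let posPres := (PySem.List.pyGetD L pos ("", 0)).2
  let posPrev := (PySem.List.pyGetD L (pos - 1) ("", 0)).2
  let posNext := (PySem.List.pyGetD L (pos + 1) ("", 0)).2
  if catg == "critical" then
    let prev := posPres - posPrev - 1
    let post := posNext - posPres - 1
    tt - (prev + 1) * (post + 1)
  else tt

def pvLastCrit (M : List (Int × Bool)) : Bool := ((M.getLast?).map (·.2)).getD false

lemma pv_mod_bridge (x : Int) : PySem.Int.mod x 2 = 0 ↔ (PySem.Int.mod x 4 = 2 ∨ PySem.Int.mod x 4 = 0) := by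
  rw [PySem.Int.mod_eq_emod_of_pos (by norm_num), PySem.Int.mod_eq_emod_of_pos (by norm_num)]
  omega

lemma pv_check_eq (x : Int) : checkSquareDiff x = decide (PySem.Int.mod x 4 = 2) := by
  unfold checkSquareDiff
  have h0 : (0:Int) ≤ PySem.Int.mod x 4 := PySem.Int.mod_nonneg x (by norm_num)
  rw [abs_of_nonneg h0]
  by_cases h : PySem.Int.mod x 4 = 2
  · rw [h]
    rfl
  · rw [if_neg (show ¬((PySem.Int.mod x 4 == 2) = true) by simp only [beq_iff_eq]; exact h)]
    rw [eq_comm, decide_eq_false_iff_not]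
    exact h

-- A's first loop builds exactly the string-annotated marker list
lemma pv_posArr_eq (arr : List Int) :
    (PySem.List.pyRange 0 (arr.length : Int) 1).foldl (fun acc pos =>
      if checkSquareDiff (PySem.List.pyGetD arr pos 0) then acc ++ [("critical", pos)]
      else if PySem.Int.mod (PySem.List.pyGetD arr pos 0) 4 == 0 then acc ++ [("even", pos)]
      else acc) ([] : List (String × Int)) = (pvMarkers arr).map pvStrOf := by
  have he := PySem.List.enumerate_eq_map_pyRange (xs := arr) (d := 0)
  have h1 : (PySem.List.pyRange 0 (arr.length : Int) 1).foldl (fun acc pos =>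
      if checkSquareDiff (PySem.List.pyGetD arr pos 0) then acc ++ [("critical", pos)]
      else if PySem.Int.mod (PySem.List.pyGetD arr pos 0) 4 == 0 then acc ++ [("even", pos)]
      else acc) ([] : List (String × Int))
      = (PySem.List.enumerate arr 0).foldl (fun acc (q : Int × Int) =>
          if checkSquareDiff q.2 then acc ++ [("critical", q.1)]
          else if PySem.Int.mod q.2 4 == 0 then acc ++ [("even", q.1)]
          else acc) [] := by
    rw [he, List.foldl_map]
    simp only [PySem.List.len_eq]
  rw [h1]
  have h2 := PySem.List.foldl_congr_mem
    (l := PySem.List.enumerate arr 0) (init := ([] : List (String × Int)))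
    (f := fun acc (q : Int × Int) =>
      if checkSquareDiff q.2 then acc ++ [("critical", q.1)]
      else if PySem.Int.mod q.2 4 == 0 then acc ++ [("even", q.1)]
      else acc)
    (g := fun acc (q : Int × Int) =>
      if (PySem.Int.mod q.2 2 == 0) then acc ++ [pvStrOf (q.1, PySem.Int.mod q.2 4 == 2)] else acc)
    (by
      intro acc q _
      dsimp only
      rw [pv_check_eq]
      by_cases h2c : PySem.Int.mod q.2 4 = 2
      · have hm : PySem.Int.mod q.2 2 = 0 := (pv_mod_bridge q.2).mpr (Or.inl h2c)
        rw [if_pos (by rw [h2c]; decide), if_pos (by rw [hm]; decide)]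
        simp only [pvStrOf]; rw [h2c]; rfl
      · by_cases h0 : PySem.Int.mod q.2 4 = 0
        · have hm : PySem.Int.mod q.2 2 = 0 := (pv_mod_bridge q.2).mpr (Or.inr h0)
          rw [if_neg (by simp only [decide_eq_true_eq]; exact h2c),
              if_pos (by rw [h0]; decide), if_pos (by rw [hm]; decide)]
          simp only [pvStrOf]; rw [h0]; rfl
        · have hm : ¬ PySem.Int.mod q.2 2 = 0 := fun hh => by
            rcases (pv_mod_bridge q.2).mp hh with h | h
            · exact h2c h
            · exact h0 h
          rw [if_neg (by simp only [decide_eq_true_eq]; exact h2c),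
              if_neg (by simp only [beq_iff_eq]; exact h0),
              if_neg (by simp only [beq_iff_eq]; exact hm)])
  rw [h2, PySem.List.foldl_append_if, List.nil_append, pvMarkers, List.map_map]
  rfl

-- B's loop, finished off, equals the start value minus pvG
lemma pv_b_fold (n : Int) (M : List (Int × Bool)) : ∀ (t p l : Int) (lc : Bool),
    (let st := M.foldl (fun (s : Int × Int × Int × Bool) (q : Int × Bool) =>
        ((if s.2.2.2 then s.1 - (s.2.2.1 - s.2.1) * (q.1 - s.2.2.1) else s.1), s.2.2.1, q.1, q.2))
        (t, p, l, lc)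
     if st.2.2.2 then st.1 - (st.2.2.1 - st.2.1) * (n - st.2.2.1) else st.1)
    = t - (if lc then (l - p) * (pvHeadIdx n M - l) else 0) - pvG n l M := by
  induction M with
  | nil => intro t p l lc; cases lc <;> simp [pvHeadIdx, pvG]
  | cons q rest ih =>
    intro t p l lc
    obtain ⟨i, c⟩ := q
    simp only [List.foldl_cons]
    rw [ih]
    cases lc <;> cases c <;> simp [pvHeadIdx, pvG] <;> ring

lemma pv_b_eq (arr : List Int) :
    getNumberOfSubs_alt arr
      = PySem.Int.floordiv ((arr.length : Int) * ((arr.length : Int) + 1)) 2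
        - pvG (arr.length : Int) (-1) (pvMarkers arr) := by
  unfold getNumberOfSubs_alt
  have he := PySem.List.enumerate_eq_map_pyRange (xs := arr) (d := 0)
  simp only []
  rw [show (PySem.List.pyRange 0 ((arr.length : Int)) 1).foldl (fun (s : Int × Int × Int × Bool) i =>
      let x := PySem.List.pyGetD arr i 0
      if PySem.Int.mod x 2 == 0 then
        ((if s.2.2.2 then s.1 - (s.2.2.1 - s.2.1) * (i - s.2.2.1) else s.1),
          s.2.2.1, i, PySem.Int.mod x 4 == 2)
      else s) (PySem.Int.floordiv ((arr.length : Int) * ((arr.length : Int) + 1)) 2, -1, -1, false)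
    = (PySem.List.enumerate arr 0).foldl (fun (s : Int × Int × Int × Bool) (q : Int × Int) =>
      if PySem.Int.mod q.2 2 == 0 then
        ((if s.2.2.2 then s.1 - (s.2.2.1 - s.2.1) * (q.1 - s.2.2.1) else s.1),
          s.2.2.1, q.1, PySem.Int.mod q.2 4 == 2)
      else s) (PySem.Int.floordiv ((arr.length : Int) * ((arr.length : Int) + 1)) 2, -1, -1, false)
    from by rw [he, List.foldl_map]; simp only [PySem.List.len_eq]]
  rw [PySem.List.foldl_if_eq_foldl_filter
      (p := fun (q : Int × Int) => PySem.Int.mod q.2 2 == 0)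
      (f := fun (s : Int × Int × Int × Bool) (q : Int × Int) =>
        ((if s.2.2.2 then s.1 - (s.2.2.1 - s.2.1) * (q.1 - s.2.2.1) else s.1),
          s.2.2.1, q.1, PySem.Int.mod q.2 4 == 2))]
  rw [show ((PySem.List.enumerate arr 0).filter (fun (q : Int × Int) => PySem.Int.mod q.2 2 == 0)).foldl
      (fun (s : Int × Int × Int × Bool) (q : Int × Int) =>
        ((if s.2.2.2 then s.1 - (s.2.2.1 - s.2.1) * (q.1 - s.2.2.1) else s.1),
          s.2.2.1, q.1, PySem.Int.mod q.2 4 == 2))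
      (PySem.Int.floordiv ((arr.length : Int) * ((arr.length : Int) + 1)) 2, -1, -1, false)
    = (pvMarkers arr).foldl (fun (s : Int × Int × Int × Bool) (q : Int × Bool) =>
        ((if s.2.2.2 then s.1 - (s.2.2.1 - s.2.1) * (q.1 - s.2.2.1) else s.1), s.2.2.1, q.1, q.2))
      (PySem.Int.floordiv ((arr.length : Int) * ((arr.length : Int) + 1)) 2, -1, -1, false)
    from by rw [pvMarkers, List.foldl_map]]
  rw [pv_b_fold]
  simp

lemma pv_getD_zero {α : Type} (x : α) (l : List α) (d : α) :
    PySem.List.pyGetD (x :: l) 0 d = x := by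
  simp [PySem.List.pyGetD, PySem.List.pyGet?, PySem.List.pyIdx?]

lemma pv_getD_cons {α : Type} (x : α) (l : List α) (i : Int) (h : 0 ≤ i) (d : α) :
    PySem.List.pyGetD (x :: l) (i + 1) d = PySem.List.pyGetD l i d := by
  simp only [PySem.List.pyGetD, PySem.List.pyGet?, PySem.List.pyIdx?, List.length_cons,
    Nat.cast_add, Nat.cast_one]
  rw [if_pos (by omega), if_pos h]
  by_cases hl : i < (l.length : Int)
  · rw [if_pos (by omega), if_pos hl]
    have : (i + 1).toNat = i.toNat + 1 := by omega
    simp [this]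
  · rw [if_neg (by omega), if_neg hl]; rfl

lemma pv_body_shift (x : String × Int) (L : List (String × Int)) (tt pos : Int) (h : 1 ≤ pos) :
    pvBody (x :: L) tt (pos + 1) = pvBody L tt pos := by
  unfold pvBody
  rw [show pos + 1 - 1 = (pos - 1) + 1 by ring,
    pv_getD_cons _ _ _ (by omega), pv_getD_cons _ _ _ (by omega),
    show pos + 1 + 1 = (pos + 1) + 1 by ring, pv_getD_cons _ _ _ (by omega)]

-- A's indexed loop computes t - pvT L
lemma pv_a_loop (L : List (String × Int)) : ∀ (t : Int),
    (PySem.List.pyRange 1 ((L.length : Int) - 1) 1).foldl (pvBody L) t = t - pvT L := by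
  induction L using pvT.induct with
  | case1 a b c rest ih =>
    intro t
    have hlen : ((a :: b :: c :: rest).length : Int) - 1 = (rest.length : Int) + 2 := by
      simp; ring
    rw [hlen, PySem.List.pyRange_one_cons (by omega), List.foldl_cons]
    have g0 : PySem.List.pyGetD (a :: b :: c :: rest) (1 - 1) ("", 0) = a := by
      norm_num [pv_getD_zero]
    have g1 : PySem.List.pyGetD (a :: b :: c :: rest) 1 ("", 0) = b := by
      rw [show (1 : Int) = 0 + 1 by ring, pv_getD_cons _ _ _ (by omega), pv_getD_zero]
    have g2 : PySem.List.pyGetD (a :: b :: c :: rest) (1 + 1) ("", 0) = c := by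
      rw [pv_getD_cons _ _ _ (by omega), show (1 : Int) = 0 + 1 by ring,
        pv_getD_cons _ _ _ (by omega), pv_getD_zero]
    have hfirst : pvBody (a :: b :: c :: rest) t 1
        = (if b.1 == "critical" then t - (b.2 - a.2 - 1 + 1) * (c.2 - b.2 - 1 + 1) else t) := by
      unfold pvBody
      rw [g0, g1, g2]
    rw [hfirst]
    have hshift : (PySem.List.pyRange (1 + 1) ((rest.length : Int) + 2) 1)
        = (PySem.List.pyRange 1 ((rest.length : Int) + 1) 1).map (· + 1) := by
      rw [PySem.List.pyRange_one, PySem.List.pyRange_one, List.map_map]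
      rw [show (rest.length : Int) + 2 - (1 + 1) = (rest.length : Int) + 1 - 1 by ring]
      exact List.map_congr_left (fun k _ => by simp; ring)
    rw [hshift, List.foldl_map]
    have hcong := PySem.List.foldl_congr_mem
      (l := PySem.List.pyRange 1 ((rest.length : Int) + 1) 1)
      (init := if b.1 == "critical" then t - (b.2 - a.2 - 1 + 1) * (c.2 - b.2 - 1 + 1) else t)
      (f := fun tt pos => pvBody (a :: b :: c :: rest) tt (pos + 1))
      (g := fun tt pos => pvBody (b :: c :: rest) tt pos)
      (by intro tt pos hmem
          have hpos : 1 ≤ pos ∧ pos < (rest.length : Int) + 1 :=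
            (PySem.List.mem_pyRange_one).mp hmem
          exact pv_body_shift _ _ _ _ hpos.1)
    rw [hcong]
    rw [show (rest.length : Int) + 1 = ((b :: c :: rest).length : Int) - 1 by simp, ih]
    rw [show pvT (a :: b :: c :: rest) = (if b.1 == "critical" then (b.2 - a.2) * (c.2 - b.2) else 0) + pvT (b :: c :: rest) from rfl]
    by_cases hb : (b.1 == "critical") = true
    · rw [if_pos hb, if_pos hb]; ring
    · rw [if_neg hb, if_neg hb]; ring
  | case2 L h =>
    intro t
    rcases L with _ | ⟨a, _ | ⟨b, _ | ⟨c, rest⟩⟩⟩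
    · rw [PySem.List.pyRange_one_eq_nil (by simp)]; simp [pvT]
    · rw [PySem.List.pyRange_one_eq_nil (by simp)]; simp [pvT]
    · rw [PySem.List.pyRange_one_eq_nil (by simp)]; simp [pvT]
    · exact absurd rfl (fun hh => h a b c rest hh)

-- the sentineled pvT equals pvG
lemma pv_t_g (n : Int) : ∀ (M : List (Int × Bool)) (s : String) (i : Int),
    pvT ((s, i) :: ((M.map pvStrOf) ++ (if pvLastCrit M then [("", n)] else []))) = pvG n i M := by
  intro M
  induction M with
  | nil => intro s i; simp [pvLastCrit, pvT, pvG]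
  | cons hd tl ih =>
    intro s i
    obtain ⟨j, c⟩ := hd
    cases tl with
    | nil =>
      cases c <;> simp [pvLastCrit, pvStrOf, pvT, pvG, pvHeadIdx]
    | cons r rs =>
      have hlast : pvLastCrit ((j, c) :: r :: rs) = pvLastCrit (r :: rs) := by
        simp [pvLastCrit]
      rw [hlast]
      have hrec : pvT ((s, i) :: ((((j, c) :: r :: rs).map pvStrOf) ++ (if pvLastCrit (r :: rs) then [("", n)] else [])))
          = (if (pvStrOf (j, c)).1 == "critical" then ((pvStrOf (j, c)).2 - i) * ((pvStrOf r).2 - (pvStrOf (j, c)).2) else 0)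
            + pvT (pvStrOf (j, c) :: (((r :: rs).map pvStrOf) ++ (if pvLastCrit (r :: rs) then [("", n)] else []))) := by
        simp only [List.map_cons, List.cons_append]
        rfl
      rw [hrec]
      have := ih (if c then "critical" else "even") j
      simp only [pvStrOf] at this ⊢
      rw [this]
      obtain ⟨rj, rc⟩ := r
      cases c <;> simp [pvG, pvHeadIdx]

lemma pv_strof_ne_even (p : Int × Bool) : ((pvStrOf p).1 != "even") = p.2 := by
  obtain ⟨j, c⟩ := p
  cases c <;> simp [pvStrOf]

lemma pv_getLastD_map (M : List (Int × Bool)) (hne : M ≠ []) (d : String × Int) :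
    (M.map pvStrOf).getLastD d = pvStrOf (M.getLast hne) := by
  rw [List.getLastD_eq_getLast?, List.getLast?_map, List.getLast?_eq_some_getLast hne]
  rfl

lemma pv_lastCrit_eq (M : List (Int × Bool)) (hne : M ≠ []) :
    pvLastCrit M = (M.getLast hne).2 := by
  rw [pvLastCrit, List.getLast?_eq_some_getLast hne]
  rfl

lemma pv_a_tail (n : Int) (M : List (Int × Bool)) :
    (let posArr := M.map pvStrOf
     let totalContigSubs : Int := PySem.Int.floordiv (n * (n + 1)) 2
     if posArr == [] then totalContigSubs else
     let posArr := if (posArr.headD ("", 0)).1 != "even" then ("", -1) :: posArr else posArr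
     let posArr := if (posArr.getLastD ("", 0)).1 != "even" then posArr ++ [("", n)] else posArr
     (PySem.List.pyRange 1 ((posArr.length : Int) - 1) 1).foldl (pvBody posArr) totalContigSubs)
    = PySem.Int.floordiv (n * (n + 1)) 2 - pvG n (-1) M := by
  cases M with
  | nil => simp [pvG]
  | cons m0 tl =>
    have hne : (m0 :: tl) ≠ [] := by simp
    simp only [List.map_cons, List.headD_cons]
    rw [if_neg (by simp)]
    rw [pv_strof_ne_even]
    obtain ⟨j, c⟩ := m0
    cases c with
    | true =>
      rw [if_pos (show ((j, true).2 = true) from rfl)]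
      have hl : ((("", -1) :: pvStrOf (j, true) :: tl.map pvStrOf).getLastD ("", 0))
          = pvStrOf (((j, true) :: tl).getLast hne) := by
        rw [List.getLastD_cons]
        exact pv_getLastD_map _ hne _
      rw [hl, pv_strof_ne_even, ← pv_lastCrit_eq _ hne]
      by_cases hc2 : pvLastCrit ((j, true) :: tl) = true
      · rw [if_pos hc2, List.cons_append, pv_a_loop]
        have := pv_t_g n ((j, true) :: tl) "" (-1)
        rw [if_pos hc2] at this
        simp only [List.map_cons] at this
        rw [this]
      · rw [if_neg hc2, pv_a_loop]
        have := pv_t_g n ((j, true) :: tl) "" (-1)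
        rw [if_neg hc2] at this
        simp only [List.map_cons, List.append_nil] at this
        rw [this]
    | false =>
      rw [if_neg (show ¬((j, false).2 = true) by simp)]
      cases tl with
      | nil =>
        rw [show ((pvStrOf (j, false) :: List.map pvStrOf ([] : List (Int × Bool))).getLastD ("", 0))
            = pvStrOf (j, false) from rfl]
        rw [pv_strof_ne_even, if_neg (show ¬((j, false).2 = true) by simp), pv_a_loop]
        rw [show pvT (pvStrOf (j, false) :: List.map pvStrOf ([] : List (Int × Bool))) = 0 from rfl]
        simp [pvG]
      | cons r rs =>
        have hne2 : (r :: rs) ≠ [] := by simp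
        have hl : ((pvStrOf (j, false) :: (r :: rs).map pvStrOf).getLastD ("", 0))
            = pvStrOf ((r :: rs).getLast hne2) := by
          rw [List.getLastD_cons]
          exact pv_getLastD_map _ hne2 _
        rw [hl, pv_strof_ne_even, ← pv_lastCrit_eq _ hne2]
        by_cases hc2 : pvLastCrit (r :: rs) = true
        · rw [if_pos hc2, pv_a_loop]
          have := pv_t_g n (r :: rs) "even" j
          rw [if_pos hc2] at this
          rw [show pvStrOf (j, false) :: (r :: rs).map pvStrOf ++ [("", n)]
              = ((("even", j) : String × Int) :: ((r :: rs).map pvStrOf ++ [("", n)])) from rfl, this]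
          rw [show pvG n (-1) ((j, false) :: r :: rs)
              = (if false then ((j : Int) - (-1)) * (pvHeadIdx n (r :: rs) - j) else 0) + pvG n j (r :: rs) from rfl]
          simp
        · rw [if_neg hc2, pv_a_loop]
          have := pv_t_g n (r :: rs) "even" j
          rw [if_neg hc2] at this
          simp only [List.append_nil] at this
          rw [show pvT (pvStrOf (j, false) :: (r :: rs).map pvStrOf)
              = pvT ((("even", j) : String × Int) :: (r :: rs).map pvStrOf) from rfl, this]
          rw [show pvG n (-1) ((j, false) :: r :: rs)
              = (if false then ((j : Int) - (-1)) * (pvHeadIdx n (r :: rs) - j) else 0) + pvG n j (r :: rs) from rfl]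
          simp

lemma pv_a_eq (arr : List Int) :
    getNumberOfSubs arr
      = PySem.Int.floordiv ((arr.length : Int) * ((arr.length : Int) + 1)) 2
        - pvG (arr.length : Int) (-1) (pvMarkers arr) := by
  unfold getNumberOfSubs
  rw [pv_posArr_eq]
  exact pv_a_tail (arr.length : Int) (pvMarkers arr)

-- ===== VERDICT (by name: the statement is the Claim_ definition above) =====
theorem getNumberOfSubs_spec : Claim_equal_getNumberOfSubs := by
  intro arr _
  unfold Spec_getNumberOfSubs
  rw [pv_a_eq, pv_b_eq]
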